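-- pv_equiv track=rewrite | github.com/pypi-data/pypi-mirror-239 | packages/zd-feishu-excel/zd_feishu_excel-1.0.4-py2.py3-none-any.whl/zd_feishu_excel/workbook.py | remove_nil_rows
-- ===== SOURCE A (Python) =====
-- def remove_nil_rows(data):
--     n = len(data)
--     while n > 0:
--         last = n - 1
--         has_data = False
--         for item in data[last]:
--             if item is not None:
--                 has_data = True
--                 break
--         if has_data:
--             break
--         n = last
--     return data[:n]
-- ===== SOURCE B (Python) =====
-- def remove_nil_rows(data):
--     last = -1
--     for i, row in enumerate(data):
--         if any(item is not None for item in row):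
--             last = i
--     return data[:last + 1]
-- ===== Notes on version B (the rewrite author's own statement) =====
-- stated objective: simpler
-- what changed: Replaces the backwards while-loop with early break (and a hand-written inner break loop) by a single forward pass that remembers the index of the last non-empty row via any(), then slices once.
import Mathlib
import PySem

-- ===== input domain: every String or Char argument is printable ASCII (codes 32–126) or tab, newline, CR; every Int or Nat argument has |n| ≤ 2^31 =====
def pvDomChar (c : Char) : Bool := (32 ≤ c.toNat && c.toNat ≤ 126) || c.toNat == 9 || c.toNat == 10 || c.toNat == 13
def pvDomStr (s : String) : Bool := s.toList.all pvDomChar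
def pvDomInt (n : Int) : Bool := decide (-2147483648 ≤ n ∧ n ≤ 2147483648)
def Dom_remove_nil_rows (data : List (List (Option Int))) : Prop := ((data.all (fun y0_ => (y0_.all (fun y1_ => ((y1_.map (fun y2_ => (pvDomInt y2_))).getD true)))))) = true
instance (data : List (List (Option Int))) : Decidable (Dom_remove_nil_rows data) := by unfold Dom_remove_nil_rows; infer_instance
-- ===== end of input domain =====

-- B replaces A's backwards while-loop with a single forward pass remembering the last non-empty row's index (simpler decomposition; same cost).

-- ===== PORT A =====
-- A's inner 'for item in data[last]: if item is not None: has_data = True; break'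
def pvHasData : List (Option Int) → Bool
  | [] => false
  | item :: rest => if item ≠ none then true else pvHasData rest

-- A's 'while n > 0: …; n = last' loop, recursing on n
def pvLoopA (data : List (List (Option Int))) : Nat → Nat
  | 0 => 0
  | Nat.succ last => if pvHasData (data.getD last []) then Nat.succ last else pvLoopA data last

def remove_nil_rows (data : List (List (Option Int))) : List (List (Option Int)) :=
  data.take (pvLoopA data data.length)

-- ===== PORT B =====
-- forward pass: last index whose row has a non-None item, -1 if none
def pvLastB (data : List (List (Option Int))) : Int :=
  (PySem.List.enumerate data).foldl
    (fun last p => if p.2.any (fun item => item.isSome) then p.1 else last) (-1)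

def remove_nil_rows_alt (data : List (List (Option Int))) : List (List (Option Int)) :=
  data.take (pvLastB data + 1).toNat

-- ===== PRECONDITION & SPEC =====
def Spec_remove_nil_rows (data : List (List (Option Int))) (out : List (List (Option Int))) : Prop := out = remove_nil_rows_alt data
instance (data : List (List (Option Int))) (out : List (List (Option Int))) : Decidable (Spec_remove_nil_rows data out) := by unfold Spec_remove_nil_rows; infer_instance

-- ===== CLAIM (what is proved, stated in full; the proofs are below) =====
def Claim_equal_remove_nil_rows : Prop := ∀ (data : List (List (Option Int))), Dom_remove_nil_rows data → Spec_remove_nil_rows data (remove_nil_rows data)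

-- ===== LEMMAS AND PROOFS =====

theorem pvHasData_eq_any (row : List (Option Int)) : pvHasData row = row.any (fun item => item.isSome) := by
  induction row with
  | nil => rfl
  | cons x xs ih =>
    cases x <;> simp [pvHasData, ih]

theorem pvLoopA_append (data : List (List (Option Int))) (x : List (Option Int)) (m : Nat) (h : m ≤ data.length) :
    pvLoopA (data ++ [x]) m = pvLoopA data m := by
  induction m with
  | zero => rfl
  | succ k ih =>
    have hk : k < data.length := h
    have hg : (data ++ [x])[k]?.getD [] = data[k]?.getD [] := by
      rw [List.getElem?_append_left hk]
    simp only [pvLoopA, List.getD, hg, ih (Nat.le_of_lt hk)]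
    rfl

theorem pvLastB_snoc (data : List (List (Option Int))) (x : List (Option Int)) :
    pvLastB (data ++ [x]) =
      if x.any (fun item => item.isSome) then (data.length : Int) else pvLastB data := by
  unfold pvLastB
  rw [PySem.List.enumerate_append, List.foldl_append]
  simp

theorem pvLoopA_eq_lastB (data : List (List (Option Int))) :
    pvLoopA data data.length = (pvLastB data + 1).toNat := by
  induction data using List.reverseRecOn with
  | nil => simp [pvLoopA, pvLastB, PySem.List.enumerate]
  | append_singleton xs x ih =>
    have hget : (xs ++ [x]).getD xs.length [] = x := by
      simp [List.getD]
    rw [List.length_append]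
    simp only [List.length_singleton]
    rw [pvLastB_snoc]
    by_cases hx : x.any (fun item => item.isSome)
    · simp [pvLoopA, pvHasData_eq_any, hx]
    · simp only [pvLoopA, hget, pvHasData_eq_any, hx]
      rw [pvLoopA_append xs x xs.length (le_refl _), ih]
      simp

-- ===== VERDICT (by name: the statement is the Claim_ definition above) =====
theorem remove_nil_rows_spec : Claim_equal_remove_nil_rows := by
  intro data _
  unfold Spec_remove_nil_rows remove_nil_rows remove_nil_rows_alt
  rw [pvLoopA_eq_lastB]
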